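-- pv_equiv track=rewrite | github.com/setupminimal/quicksort-precheck | quicksort.py | diverge
-- ===== SOURCE A (Python) =====
-- def diverge(l):
--     max = min = l[0]
--     changes = 0
--     for i in l:
--         if max < i:
--             max = i
--             changes += 1
--         if min > i:
--             min = i
--             changes += 1
--     return changes < len(l) - 2
-- ===== SOURCE B (Python) =====
-- def diverge(l):
--     # build running-maximum and running-minimum prefix tables, then count transitions
--     maxs = [l[0]]
--     for x in l[1:]:
--         m = maxs[-1]
--         maxs.append(m if m >= x else x)
--     mins = [l[0]]
--     for x in l[1:]:
--         m = mins[-1]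
--         mins.append(m if m <= x else x)
--     changes = sum(1 for a, b in zip(maxs, maxs[1:]) if b > a) \
--             + sum(1 for a, b in zip(mins, mins[1:]) if b < a)
--     return changes < len(l) - 2
-- ===== Notes on version B (the rewrite author's own statement) =====
-- stated objective: alternative
-- what changed: Replaces the single fused scan that carries max/min/changes together with a build-then-count decomposition: materialize the running-maximum and running-minimum prefix tables first, then count strict transitions in each table.
import Mathlib
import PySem

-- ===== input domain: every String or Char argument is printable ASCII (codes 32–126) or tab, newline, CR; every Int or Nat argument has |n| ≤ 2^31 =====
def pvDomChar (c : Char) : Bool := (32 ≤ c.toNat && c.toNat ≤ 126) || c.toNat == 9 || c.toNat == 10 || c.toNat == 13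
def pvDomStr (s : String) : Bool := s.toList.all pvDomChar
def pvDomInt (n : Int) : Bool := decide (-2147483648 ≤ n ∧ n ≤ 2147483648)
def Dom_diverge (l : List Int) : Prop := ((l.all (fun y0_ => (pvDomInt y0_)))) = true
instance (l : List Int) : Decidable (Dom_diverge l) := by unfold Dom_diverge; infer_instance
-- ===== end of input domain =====

-- B replaces A's fused running max/min/changes scan by building the running-max and
-- running-min prefix tables first and then counting strict transitions (alternative decomposition).
-- Both A and B raise IndexError on the empty list (first subscript), hence Pre_ below.

-- ===== PORT A =====
-- A: one fold carrying (max, min, changes)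
def diverge (l : List Int) : Bool :=
  match l with
  | [] => false   -- unreachable: Python raises IndexError at the first subscript; excluded by Pre_diverge
  | x :: _ =>
    let s := l.foldl (fun (st : Int × Int × Int) i =>
      let mx := st.1; let mn := st.2.1; let ch := st.2.2
      let p := if mx < i then (i, ch + 1) else (mx, ch)
      let q := if mn > i then (i, p.2 + 1) else (mn, p.2)
      (p.1, q.1, q.2)) (x, x, (0 : Int))
    decide (s.2.2 < (l.length : Int) - 2)

-- ===== PORT B =====
def diverge_alt (l : List Int) : Bool :=
  match l with
  | [] => false   -- unreachable: Python raises IndexError at the first subscript; excluded by Pre_diverge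
  | x :: rest =>
    let maxs := rest.foldl (fun acc y =>
      let m := acc.getLastD 0
      acc ++ [if m ≥ y then m else y]) [x]
    let mins := rest.foldl (fun acc y =>
      let m := acc.getLastD 0
      acc ++ [if m ≤ y then m else y]) [x]
    let changes : Int :=
      ((maxs.zip (maxs.drop 1)).countP (fun p => p.2 > p.1) : Int)
      + ((mins.zip (mins.drop 1)).countP (fun p => p.2 < p.1) : Int)
    decide (changes < (l.length : Int) - 2)

-- ===== PRECONDITION & SPEC =====
-- Pre_ excludes only the empty list, on which the Python A raises IndexError at the first subscript.
def Pre_diverge (l : List Int) : Prop := l ≠ []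
instance (l : List Int) : Decidable (Pre_diverge l) := by unfold Pre_diverge; infer_instance
def pvWitness_diverge : List Int := [3, 1, 4, 1, 5]
def Spec_diverge (l : List Int) (out : Bool) : Prop := out = diverge_alt l
instance (l : List Int) (out : Bool) : Decidable (Spec_diverge l out) := by unfold Spec_diverge; infer_instance

-- ===== CLAIM (what is proved, stated in full; the proofs are below) =====
def Claim_equal_diverge : Prop := ∀ (l : List Int), Dom_diverge l → Pre_diverge l → Spec_diverge l (diverge l)

-- ===== LEMMAS AND PROOFS =====

-- reference count of strict max-updates of A's scan, and running max/min
def cntMax (m : Int) : List Int → Int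
  | [] => 0
  | x :: xs => (if m < x then 1 else 0) + cntMax (if m < x then x else m) xs

def cntMin (m : Int) : List Int → Int
  | [] => 0
  | x :: xs => (if m > x then 1 else 0) + cntMin (if m > x then x else m) xs

def rMax (m : Int) : List Int → Int
  | [] => m
  | x :: xs => rMax (if m < x then x else m) xs

def rMin (m : Int) : List Int → Int
  | [] => m
  | x :: xs => rMin (if m > x then x else m) xs

-- A's fold equals the reference quantities
lemma foldA_eq (xs : List Int) : ∀ (M m c : Int),
    xs.foldl (fun (st : Int × Int × Int) i =>
      let mx := st.1; let mn := st.2.1; let ch := st.2.2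
      let p := if mx < i then (i, ch + 1) else (mx, ch)
      let q := if mn > i then (i, p.2 + 1) else (mn, p.2)
      (p.1, q.1, q.2)) (M, m, c)
    = (rMax M xs, rMin m xs, c + cntMax M xs + cntMin m xs) := by
  induction xs with
  | nil => intro M m c; simp [rMax, rMin, cntMax, cntMin]
  | cons x xs ih =>
    intro M m c
    simp only [List.foldl_cons, rMax, rMin, cntMax, cntMin]
    rw [show (let mx := M; let mn := m; let ch := c;
        let p := if mx < x then (x, ch + 1) else (mx, ch)
        let q := if mn > x then (x, p.2 + 1) else (mn, p.2)
        (p.1, q.1, q.2))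
      = ((if M < x then x else M), (if m > x then x else m),
         c + (if M < x then 1 else 0) + (if m > x then 1 else 0)) from by
        dsimp only; split_ifs <;> simp]
    rw [ih]
    ring_nf

-- the scan list B builds, in closed recursive form
def scanBy (f : Int → Int → Int) (m : Int) : List Int → List Int
  | [] => [m]
  | x :: xs => m :: scanBy f (f m x) xs

lemma scanBy_eq_cons (f : Int → Int → Int) (m : Int) (xs : List Int) :
    ∃ t, scanBy f m xs = m :: t := by
  cases xs with
  | nil => exact ⟨[], rfl⟩
  | cons y ys => exact ⟨_, rfl⟩

-- B's append-fold builds the scan list (prefix-invariant form)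
lemma foldB_eq (f : Int → Int → Int) (xs : List Int) : ∀ (A : List Int) (m : Int),
    xs.foldl (fun acc y => let t := acc.getLastD 0; acc ++ [f t y]) (A ++ [m])
    = A ++ scanBy f m xs := by
  induction xs with
  | nil => intro A m; simp [scanBy]
  | cons x xs ih =>
    intro A m
    simp only [List.foldl_cons]
    have hlast : (A ++ [m]).getLastD 0 = m := by simp
    rw [hlast, show A ++ [m] ++ [f m x] = (A ++ [m]) ++ [f m x] from rfl, ih]
    simp [scanBy]

-- counting strict transitions in a scan list equals the reference count
lemma count_scan_max (xs : List Int) : ∀ (m : Int),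
    (((scanBy (fun a b => if a ≥ b then a else b) m xs).zip
      ((scanBy (fun a b => if a ≥ b then a else b) m xs).drop 1)).countP
        (fun p => p.2 > p.1) : Int) = cntMax m xs := by
  induction xs with
  | nil => intro m; simp [scanBy, cntMax]
  | cons x xs ih =>
    intro m
    obtain ⟨t, ht⟩ := scanBy_eq_cons (fun a b => if a ≥ b then a else b) (if m ≥ x then m else x) xs
    have ihx := ih (if m ≥ x then m else x)
    rw [ht] at ihx
    simp only [scanBy, ht, List.drop_one, List.tail_cons, List.zip_cons_cons, List.countP_cons] at ihx ⊢
    rw [cntMax]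
    by_cases hx : m ≥ x
    · have h1 : ¬ (m < x) := by omega
      simp only [if_pos hx, if_neg h1] at ihx ⊢
      simp only [show (decide (m > m)) = false from by simp]
      push_cast
      omega
    · have h1 : m < x := by omega
      simp only [if_neg hx, if_pos h1] at ihx ⊢
      simp only [show (decide (x > m)) = true from by simp [h1]]
      push_cast
      omega

lemma count_scan_min (xs : List Int) : ∀ (m : Int),
    (((scanBy (fun a b => if a ≤ b then a else b) m xs).zip
      ((scanBy (fun a b => if a ≤ b then a else b) m xs).drop 1)).countP
        (fun p => p.2 < p.1) : Int) = cntMin m xs := by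
  induction xs with
  | nil => intro m; simp [scanBy, cntMin]
  | cons x xs ih =>
    intro m
    obtain ⟨t, ht⟩ := scanBy_eq_cons (fun a b => if a ≤ b then a else b) (if m ≤ x then m else x) xs
    have ihx := ih (if m ≤ x then m else x)
    rw [ht] at ihx
    simp only [scanBy, ht, List.drop_one, List.tail_cons, List.zip_cons_cons, List.countP_cons] at ihx ⊢
    rw [cntMin]
    by_cases hx : m ≤ x
    · have h1 : ¬ (m > x) := by omega
      simp only [if_pos hx, if_neg h1] at ihx ⊢
      simp only [show (decide (m < m)) = false from by simp]
      push_cast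
      omega
    · have h1 : m > x := by omega
      simp only [if_neg hx, if_pos h1] at ihx ⊢
      simp only [show (decide (x < m)) = true from by simp [h1]]
      push_cast
      omega

-- on a nonempty list x :: xs, A's first step leaves the state unchanged
lemma cntMax_head (x : Int) (xs : List Int) : cntMax x (x :: xs) = cntMax x xs := by
  simp [cntMax]
lemma cntMin_head (x : Int) (xs : List Int) : cntMin x (x :: xs) = cntMin x xs := by
  simp [cntMin]

-- ===== VERDICT (by name: the statement is the Claim_ definition above) =====
theorem diverge_spec : Claim_equal_diverge := by
  intro l _ hpre
  unfold Spec_diverge diverge diverge_alt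
  match l with
  | [] => exact absurd rfl hpre
  | x :: xs =>
    simp only
    rw [foldA_eq]
    have hmax := foldB_eq (fun a b => if a ≥ b then a else b) xs [] x
    have hmin := foldB_eq (fun a b => if a ≤ b then a else b) xs [] x
    simp only [List.nil_append] at hmax hmin
    rw [hmax, hmin, count_scan_max, count_scan_min, cntMax_head, cntMin_head]
    simp only [zero_add]
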